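-- pv_equiv track=rewrite | github.com/apoiobcc/LUNCH | src/parsers/input/parser_workload.py | getPeriod
-- ===== SOURCE A (Python) =====
-- PTIMESTAMP = ["08:00", "10:00", "14:00", "16:00"]
--
-- PCODES = [11,12,21,22]
--
-- PMAX = "18:00"
--
-- def getPeriod(period):
--     if period == '': return []
--     if not period[:2].isdigit():
--         period = '0' + period
--     if period in PTIMESTAMP:
--         return [PCODES[PTIMESTAMP.index(period)]]
--     for i in range(len(PTIMESTAMP)-1):
--         if PTIMESTAMP[i] < period and period < PTIMESTAMP[i+1]:
--             return [PCODES[i], PCODES[i+1]]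
--     if period < PTIMESTAMP[0]:
--         return [PCODES[0]]
--     if period > PTIMESTAMP[-1] and period < PMAX:
--         return [PCODES[-1]]
--     # if it is not in a coded period, this class will not interfer in the scheduler
--     return []
-- ===== SOURCE B (Python) =====
-- PTIMESTAMP = ["08:00", "10:00", "14:00", "16:00"]
--
-- PCODES = [11, 12, 21, 22]
--
-- PMAX = "18:00"
--
-- def getPeriod(period):
--     if period == '':
--         return []
--     if not period[:2].isdigit():
--         period = '0' + period
--     # binary search: insertion position of period in the sorted PTIMESTAMP
--     lo, hi = 0, len(PTIMESTAMP)
--     while lo < hi: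
--         mid = (lo + hi) // 2
--         if PTIMESTAMP[mid] < period:
--             lo = mid + 1
--         else:
--             hi = mid
--     pos = lo
--     if pos < len(PTIMESTAMP) and PTIMESTAMP[pos] == period:
--         return [PCODES[pos]]
--     if pos == 0:
--         return [PCODES[0]]
--     if pos == len(PTIMESTAMP):
--         return [PCODES[-1]] if period < PMAX else []
--     return [PCODES[pos - 1], PCODES[pos]]
-- ===== Notes on version B (the rewrite author's own statement) =====
-- stated objective: alternative
-- what changed: Replaces A's membership test + index lookup + linear interval scan + boundary checks with a single hand-written binary search for the insertion position in PTIMESTAMP, then branches on that position (exact match / before first / past last / between two slots).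
import Mathlib
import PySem

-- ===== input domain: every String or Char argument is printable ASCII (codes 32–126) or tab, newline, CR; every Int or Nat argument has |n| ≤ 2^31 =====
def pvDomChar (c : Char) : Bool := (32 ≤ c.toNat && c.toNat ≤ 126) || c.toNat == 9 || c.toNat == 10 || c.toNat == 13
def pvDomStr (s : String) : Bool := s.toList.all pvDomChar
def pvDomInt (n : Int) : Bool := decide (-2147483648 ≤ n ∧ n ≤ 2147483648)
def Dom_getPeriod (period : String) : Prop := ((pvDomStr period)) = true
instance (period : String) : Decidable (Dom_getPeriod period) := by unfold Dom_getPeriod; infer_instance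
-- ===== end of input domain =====

-- B replaces A's membership test + linear interval scan by one binary-search insertion
-- position with a branch on it (alternative structure; the list has 4 elements, so no speed claim).

def pvPTIMESTAMP : List String := ["08:00", "10:00", "14:00", "16:00"]
def pvPCODES : List Int := [11, 12, 21, 22]
def pvPMAX : String := "18:00"

-- ===== PORT A =====
-- the 'for i in range(len(PTIMESTAMP)-1)' loop with its early return
def pvScanA (p : String) : List Nat → Option (List Int)
  | [] => none
  | i :: rest =>
    if pvPTIMESTAMP.getD i "" < p ∧ p < pvPTIMESTAMP.getD (i + 1) "" then
      some [pvPCODES.getD i 0, pvPCODES.getD (i + 1) 0]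
    else pvScanA p rest

-- the body after the '' check and the '0'-prefix normalization
def pvAfterA (p : String) : List Int :=
  if p ∈ pvPTIMESTAMP then
    [pvPCODES.getD ((PySem.List.index? pvPTIMESTAMP p).getD 0) 0]
  else
    match pvScanA p (List.range (pvPTIMESTAMP.length - 1)) with
    | some r => r
    | none =>
      if p < pvPTIMESTAMP.getD 0 "" then [pvPCODES.getD 0 0]
      else if pvPTIMESTAMP.getD (pvPTIMESTAMP.length - 1) "" < p ∧ p < pvPMAX then
        [pvPCODES.getD (pvPCODES.length - 1) 0]
      else []

def getPeriod (period : String) : List Int :=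
  if period = "" then []
  else
    pvAfterA
      (if ¬ PySem.Str.strIsdigit (PySem.Str.slice period none (some 2)) then "0" ++ period
       else period)

-- ===== PORT B =====
-- Source B's while-loop binary search (lo, hi) for the insertion position
def pvBisect (p : String) (lo hi : Nat) : Nat :=
  if h : lo < hi then
    let mid := (lo + hi) / 2
    if pvPTIMESTAMP.getD mid "" < p then pvBisect p (mid + 1) hi
    else pvBisect p lo mid
  else lo
termination_by hi - lo
decreasing_by all_goals omega

-- Source B's body after the '' check and the normalization
def pvAfterB (p : String) : List Int :=
  let pos := pvBisect p 0 pvPTIMESTAMP.length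
  if pos < pvPTIMESTAMP.length ∧ pvPTIMESTAMP.getD pos "" = p then
    [pvPCODES.getD pos 0]
  else if pos = 0 then [pvPCODES.getD 0 0]
  else if pos = pvPTIMESTAMP.length then
    if p < pvPMAX then [pvPCODES.getD (pvPCODES.length - 1) 0] else []
  else [pvPCODES.getD (pos - 1) 0, pvPCODES.getD pos 0]

def getPeriod_alt (period : String) : List Int :=
  if period = "" then []
  else
    pvAfterB
      (if ¬ PySem.Str.strIsdigit (PySem.Str.slice period none (some 2)) then "0" ++ period
       else period)

-- ===== PRECONDITION & SPEC =====
def Spec_getPeriod (period : String) (out : List Int) : Prop := out = getPeriod_alt period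
instance (period : String) (out : List Int) : Decidable (Spec_getPeriod period out) := by unfold Spec_getPeriod; infer_instance

-- ===== CLAIM (what is proved, stated in full; the proofs are below) =====
def Claim_equal_getPeriod : Prop := ∀ (period : String), Dom_getPeriod period → Spec_getPeriod period (getPeriod period)

-- ===== LEMMAS AND PROOFS =====

lemma pvKey (p : String) : pvAfterA p = pvAfterB p := by
  have s01 : ("08:00":String) < "10:00" := by simp; decide
  have s12 : ("10:00":String) < "14:00" := by simp; decide
  have s23 : ("14:00":String) < "16:00" := by simp; decide
  have s34 : ("16:00":String) < "18:00" := by simp; decide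
  rcases lt_trichotomy p "08:00" with h0 | h0 | h0
  · -- p < "08:00"
    have u0 : p < ("08:00":String) := h0
    have u1 : p < ("10:00":String) := lt_trans h0 s01
    have u2 : p < ("14:00":String) := lt_trans (lt_trans h0 s01) s12
    have u3 : p < ("16:00":String) := lt_trans (lt_trans (lt_trans h0 s01) s12) s23
    have u4 : p < ("18:00":String) := lt_trans (lt_trans (lt_trans (lt_trans h0 s01) s12) s23) s34
    simp [pvAfterA, pvAfterB, pvScanA, pvBisect, pvPTIMESTAMP, pvPCODES, pvPMAX, List.range_succ,
      u0, u1, u2, u3, u4, lt_asymm u0, lt_asymm u1, lt_asymm u2, lt_asymm u3, lt_asymm u4, ne_of_lt u0, ne_of_lt u1, ne_of_lt u2, ne_of_lt u3, (ne_of_lt u0).symm, (ne_of_lt u1).symm, (ne_of_lt u2).symm, (ne_of_lt u3).symm]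
  · subst h0; simp [pvAfterA, pvAfterB, pvScanA, pvBisect, pvPTIMESTAMP, pvPCODES, pvPMAX, List.range_succ]; decide
  · rcases lt_trichotomy p "10:00" with h1 | h1 | h1
    · -- "08:00" < p < "10:00"
      have l0 : ("08:00":String) < p := h0
      have u1 : p < ("10:00":String) := h1
      have u2 : p < ("14:00":String) := lt_trans h1 s12
      have u3 : p < ("16:00":String) := lt_trans (lt_trans h1 s12) s23
      have u4 : p < ("18:00":String) := lt_trans (lt_trans (lt_trans h1 s12) s23) s34
      simp [pvAfterA, pvAfterB, pvScanA, pvBisect, pvPTIMESTAMP, pvPCODES, pvPMAX, List.range_succ,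
        l0, u1, u2, u3, u4, lt_asymm l0, lt_asymm u1, lt_asymm u2, lt_asymm u3, lt_asymm u4, ne_of_gt l0, ne_of_lt u1, ne_of_lt u2, ne_of_lt u3, (ne_of_gt l0).symm, (ne_of_lt u1).symm, (ne_of_lt u2).symm, (ne_of_lt u3).symm]
    · subst h1; simp [pvAfterA, pvAfterB, pvScanA, pvBisect, pvPTIMESTAMP, pvPCODES, pvPMAX, List.range_succ]; decide
    · rcases lt_trichotomy p "14:00" with h2 | h2 | h2
      · -- "10:00" < p < "14:00"
        have l0 : ("08:00":String) < p := h0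
        have l1 : ("10:00":String) < p := h1
        have u2 : p < ("14:00":String) := h2
        have u3 : p < ("16:00":String) := lt_trans h2 s23
        have u4 : p < ("18:00":String) := lt_trans (lt_trans h2 s23) s34
        simp [pvAfterA, pvAfterB, pvScanA, pvBisect, pvPTIMESTAMP, pvPCODES, pvPMAX, List.range_succ,
          l0, l1, u2, u3, u4, lt_asymm l0, lt_asymm l1, lt_asymm u2, lt_asymm u3, lt_asymm u4, ne_of_gt l0, ne_of_gt l1, ne_of_lt u2, ne_of_lt u3, (ne_of_gt l0).symm, (ne_of_gt l1).symm, (ne_of_lt u2).symm, (ne_of_lt u3).symm]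
      · subst h2; simp [pvAfterA, pvAfterB, pvScanA, pvBisect, pvPTIMESTAMP, pvPCODES, pvPMAX, List.range_succ]; decide
      · rcases lt_trichotomy p "16:00" with h3 | h3 | h3
        · -- "14:00" < p < "16:00"
          have l0 : ("08:00":String) < p := h0
          have l1 : ("10:00":String) < p := h1
          have l2 : ("14:00":String) < p := h2
          have u3 : p < ("16:00":String) := h3
          have u4 : p < ("18:00":String) := lt_trans h3 s34
          simp [pvAfterA, pvAfterB, pvScanA, pvBisect, pvPTIMESTAMP, pvPCODES, pvPMAX, List.range_succ,
            l0, l1, l2, u3, u4, lt_asymm l0, lt_asymm l1, lt_asymm l2, lt_asymm u3, lt_asymm u4, ne_of_gt l0, ne_of_gt l1, ne_of_gt l2, ne_of_lt u3, (ne_of_gt l0).symm, (ne_of_gt l1).symm, (ne_of_gt l2).symm, (ne_of_lt u3).symm]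
        · subst h3; simp [pvAfterA, pvAfterB, pvScanA, pvBisect, pvPTIMESTAMP, pvPCODES, pvPMAX, List.range_succ]; decide
        · rcases lt_trichotomy p "18:00" with h4 | h4 | h4
          · -- "16:00" < p < "18:00"
            have l0 : ("08:00":String) < p := h0
            have l1 : ("10:00":String) < p := h1
            have l2 : ("14:00":String) < p := h2
            have l3 : ("16:00":String) < p := h3
            have u4 : p < ("18:00":String) := h4
            simp [pvAfterA, pvAfterB, pvScanA, pvBisect, pvPTIMESTAMP, pvPCODES, pvPMAX, List.range_succ,
              l0, l1, l2, l3, u4, lt_asymm l0, lt_asymm l1, lt_asymm l2, lt_asymm l3, lt_asymm u4, ne_of_gt l0, ne_of_gt l1, ne_of_gt l2, ne_of_gt l3, (ne_of_gt l0).symm, (ne_of_gt l1).symm, (ne_of_gt l2).symm, (ne_of_gt l3).symm]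
          · subst h4; simp [pvAfterA, pvAfterB, pvScanA, pvBisect, pvPTIMESTAMP, pvPCODES, pvPMAX, List.range_succ]; decide
          · -- "18:00" < p
            have l0 : ("08:00":String) < p := h0
            have l1 : ("10:00":String) < p := h1
            have l2 : ("14:00":String) < p := h2
            have l3 : ("16:00":String) < p := h3
            have l4 : ("18:00":String) < p := h4
            simp [pvAfterA, pvAfterB, pvScanA, pvBisect, pvPTIMESTAMP, pvPCODES, pvPMAX, List.range_succ,
              l0, l1, l2, l3, l4, lt_asymm l0, lt_asymm l1, lt_asymm l2, lt_asymm l3, lt_asymm l4, ne_of_gt l0, ne_of_gt l1, ne_of_gt l2, ne_of_gt l3, (ne_of_gt l0).symm, (ne_of_gt l1).symm, (ne_of_gt l2).symm, (ne_of_gt l3).symm]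

-- ===== VERDICT (by name: the statement is the Claim_ definition above) =====
theorem getPeriod_spec : Claim_equal_getPeriod := by
  intro period _
  unfold Spec_getPeriod getPeriod getPeriod_alt
  split
  · rfl
  · exact pvKey _
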